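-- pv_equiv track=rewrite | github.com/Revilllo7/cryptography-classes | lab06/algorithms/double_spaces.py | extract_single_double_space
-- ===== SOURCE A (Python) =====
-- def extract_single_double_space(watermarked):
--     bits = ""
--     i = 0
--     while i < len(watermarked):
--         if watermarked[i] == " ":
--             if i+1 < len(watermarked) and watermarked[i+1] == " ":
--                 bits += "1"
--                 i += 2
--             else:
--                 bits += "0"
--                 i += 1
--         else:
--             i += 1
--     return bits.rstrip("0")
-- ===== SOURCE B (Python) =====
-- def extract_single_double_space(watermarked):
--     # Run-based decoding: each maximal run of k spaces contributes
--     # "1" * (k // 2) followed by "0" * (k % 2).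
--     parts = []
--     run = 0
--     for ch in watermarked:
--         if ch == " ":
--             run += 1
--         else:
--             parts.append("1" * (run // 2) + "0" * (run % 2))
--             run = 0
--     parts.append("1" * (run // 2) + "0" * (run % 2))
--     return "".join(parts).rstrip("0")
-- ===== Notes on version B (the rewrite author's own statement) =====
-- stated objective: alternative
-- what changed: Replaces A's index-stepping while loop with two-character lookahead by a single grouping pass that counts each maximal run of spaces and emits that run's bits in closed form (half the run length as ones, plus one zero if the length is odd).
import Mathlib
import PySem

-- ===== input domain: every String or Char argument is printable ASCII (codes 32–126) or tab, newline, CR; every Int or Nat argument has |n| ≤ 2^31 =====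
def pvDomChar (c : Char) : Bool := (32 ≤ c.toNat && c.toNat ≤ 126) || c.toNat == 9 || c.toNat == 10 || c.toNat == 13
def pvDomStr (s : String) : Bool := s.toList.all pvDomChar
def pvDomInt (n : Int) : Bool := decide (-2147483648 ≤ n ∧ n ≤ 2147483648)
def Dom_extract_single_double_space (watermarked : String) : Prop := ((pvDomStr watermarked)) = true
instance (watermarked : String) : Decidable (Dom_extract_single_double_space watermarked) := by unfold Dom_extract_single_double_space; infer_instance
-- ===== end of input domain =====

-- B replaces A's index-stepping loop (two-character lookahead, i += 1 or 2) by a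
-- single grouping pass over maximal space runs with a closed-form emission per run.

-- exact port of Python's s.rstrip("0"): drop trailing '0' characters (used by both Pythons)
def pvRstrip0 (cs : List Char) : List Char := (cs.reverse.dropWhile (· = '0')).reverse

-- ===== PORT A =====
-- the while loop over i: at a space, look at i+1; consume two spaces → '1', one → '0'
def aLoop : List Char → List Char
  | c1 :: c2 :: rest =>
    if c1 = ' ' then
      if c2 = ' ' then '1' :: aLoop rest
      else '0' :: aLoop (c2 :: rest)
    else aLoop (c2 :: rest)
  | [c1] => if c1 = ' ' then ['0'] else []
  | [] => []

def extract_single_double_space (watermarked : String) : String :=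
  String.ofList (pvRstrip0 (aLoop watermarked.toList))

-- ===== PORT B =====
-- contribution of one maximal run of k spaces: "1"*(k//2) + "0"*(k%2)
def bFlush (k : Nat) : List Char := List.replicate (k / 2) '1' ++ List.replicate (k % 2) '0'

-- the for loop with running space-run counter `run`, flushing at each non-space and at the end
def bLoop : List Char → Nat → List Char
  | [], run => bFlush run
  | c :: rest, run =>
    if c = ' ' then bLoop rest (run + 1)
    else bFlush run ++ bLoop rest 0

def extract_single_double_space_alt (watermarked : String) : String :=
  String.ofList (pvRstrip0 (bLoop watermarked.toList 0))

-- ===== PRECONDITION & SPEC =====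
def Spec_extract_single_double_space (watermarked : String) (out : String) : Prop := out = extract_single_double_space_alt watermarked
instance (watermarked : String) (out : String) : Decidable (Spec_extract_single_double_space watermarked out) := by unfold Spec_extract_single_double_space; infer_instance

-- ===== CLAIM (what is proved, stated in full; the proofs are below) =====
def Claim_equal_extract_single_double_space : Prop := ∀ (watermarked : String), Dom_extract_single_double_space watermarked → Spec_extract_single_double_space watermarked (extract_single_double_space watermarked)

-- ===== LEMMAS AND PROOFS =====

-- A's loop on a pure run of k spaces yields exactly bFlush k
theorem aLoop_replicate (k : Nat) : aLoop (List.replicate k ' ') = bFlush k := by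
  induction k using Nat.strong_induction_on with
  | _ k ih =>
    match k with
    | 0 => simp [aLoop, bFlush]
    | 1 => simp [aLoop, bFlush]
    | (k + 2) =>
      have h : (k + 2) = k + 2 := rfl
      simp only [List.replicate, aLoop]
      rw [ih k (by omega)]
      have h2 : (k + 2) / 2 = k / 2 + 1 := by omega
      have h3 : (k + 2) % 2 = k % 2 := by omega
      simp [bFlush, h2, h3, List.replicate_succ]

-- A's loop on a run of k spaces followed by a non-space c emits bFlush k then continues at c
theorem aLoop_replicate_cons (k : Nat) (c : Char) (rest : List Char) (hc : c ≠ ' ') :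
    aLoop (List.replicate k ' ' ++ c :: rest) = bFlush k ++ aLoop (c :: rest) := by
  induction k using Nat.strong_induction_on with
  | _ k ih =>
    match k with
    | 0 => simp [bFlush]
    | 1 =>
      cases rest with
      | nil => simp [aLoop, hc, bFlush]
      | cons d tl => simp [aLoop, hc, bFlush]
    | (k + 2) =>
      simp only [List.replicate, List.cons_append, aLoop]
      rw [ih k (by omega)]
      have h2 : (k + 2) / 2 = k / 2 + 1 := by omega
      have h3 : (k + 2) % 2 = k % 2 := by omega
      simp [bFlush, h2, h3, List.replicate_succ]

-- A's loop skips a leading non-space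
theorem aLoop_cons_ne (c : Char) (rest : List Char) (hc : c ≠ ' ') :
    aLoop (c :: rest) = aLoop rest := by
  cases rest with
  | nil => simp [aLoop, hc]
  | cons d tl => simp [aLoop, hc]

-- the main correspondence: B's running counter equals A's loop preceded by that many spaces
theorem bLoop_eq (cs : List Char) : ∀ k, bLoop cs k = aLoop (List.replicate k ' ' ++ cs) := by
  induction cs with
  | nil => intro k; simp [bLoop, aLoop_replicate]
  | cons c rest ih =>
    intro k
    by_cases hc : c = ' '
    · subst hc
      have : List.replicate k ' ' ++ ' ' :: rest = List.replicate (k + 1) ' ' ++ rest := by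
        simp [List.replicate_succ']
      simp [bLoop, this, ih (k + 1)]
    · rw [aLoop_replicate_cons k c rest hc]
      simp [bLoop, hc, ih 0, aLoop_cons_ne c rest hc]

-- ===== VERDICT (by name: the statement is the Claim_ definition above) =====
theorem extract_single_double_space_spec : Claim_equal_extract_single_double_space := by
  intro w _
  unfold Spec_extract_single_double_space extract_single_double_space extract_single_double_space_alt
  rw [bLoop_eq]
  simp
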